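-- pv_equiv track=rewrite | github.com/Conner-Anderson/discord-hvz | discord_hvz/utilities.py | have_lists_changed
-- ===== SOURCE A (Python) =====
-- from typing import Dict, List, TYPE_CHECKING, Union
--
-- def have_lists_changed(list1: List, list2: List, items: List) -> bool:
--     if list1 == list2:
--         return False
--     for item in items:
--         if item in list1 and item not in list2:
--             return True
--         elif item in list2 and item not in list1:
--             return True
--     return False
-- ===== SOURCE B (Python) =====
-- def _bs_contains(a, x):
--     # binary search on a sorted list: does x occur in a?
--     lo, hi = 0, len(a)
--     while lo < hi:
--         mid = (lo + hi) // 2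
--         if a[mid] < x:
--             lo = mid + 1
--         else:
--             hi = mid
--     return lo < len(a) and a[lo] == x
--
--
-- def have_lists_changed(list1, list2, items):
--     s1 = sorted(list1)
--     s2 = sorted(list2)
--     for item in items:
--         if _bs_contains(s1, item) != _bs_contains(s2, item):
--             return True
--     return False
-- ===== Notes on version B (the rewrite author's own statement) =====
-- stated objective: alternative
-- what changed: Sorts both lists once and decides each item's membership by hand-written binary search, returning on the first item whose two membership bits differ (XOR), instead of A's per-item linear scans with two branches and a list1==list2 guard.
import Mathlib
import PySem

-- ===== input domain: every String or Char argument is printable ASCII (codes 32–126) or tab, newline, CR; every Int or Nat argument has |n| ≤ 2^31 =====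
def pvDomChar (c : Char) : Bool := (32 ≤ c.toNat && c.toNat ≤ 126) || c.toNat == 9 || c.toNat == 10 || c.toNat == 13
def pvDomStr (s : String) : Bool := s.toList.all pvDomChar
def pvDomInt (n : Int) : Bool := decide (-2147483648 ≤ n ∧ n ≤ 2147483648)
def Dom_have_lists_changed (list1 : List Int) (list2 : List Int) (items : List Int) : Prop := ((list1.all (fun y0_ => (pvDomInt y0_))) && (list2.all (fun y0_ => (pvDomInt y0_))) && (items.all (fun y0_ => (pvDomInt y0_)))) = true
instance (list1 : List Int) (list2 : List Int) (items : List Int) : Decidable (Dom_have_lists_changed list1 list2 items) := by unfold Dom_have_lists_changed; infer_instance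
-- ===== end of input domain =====

-- B sorts both lists once and decides each item's membership by hand-written binary
-- search, returning on the first item whose two membership bits differ (XOR),
-- instead of A's per-item linear scans with two branches and a list1==list2 guard
-- (alternative algorithm; not claimed faster).

-- ===== PORT A =====
-- the 'for item in items' loop with its early returns
def have_lists_changed_loop (list1 : List Int) (list2 : List Int) : List Int → Bool
  | [] => false
  | item :: rest =>
      if list1.contains item && !(list2.contains item) then true
      else if list2.contains item && !(list1.contains item) then true
      else have_lists_changed_loop list1 list2 rest

def have_lists_changed (list1 : List Int) (list2 : List Int) (items : List Int) : Bool :=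
  if list1 == list2 then false
  else have_lists_changed_loop list1 list2 items

-- ===== PORT B =====
-- the 'while lo < hi' loop of _bs_contains, with fuel = hi - lo as a totality guard
-- (the interval shrinks each iteration, so the fuel is never exhausted); (lo+hi)//2 on Nat matches Python's '//'
-- on these nonnegative values, and a[mid] is in range (lo ≤ mid < hi ≤ len), so getD is exact
def bs_while (a : List Int) (x : Int) : Nat → Nat → Nat → Nat
  | 0, lo, _ => lo
  | fuel + 1, lo, hi =>
      if lo < hi then
        let mid := (lo + hi) / 2
        if a.getD mid 0 < x then bs_while a x fuel (mid + 1) hi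
        else bs_while a x fuel lo mid
      else lo

def bs_contains (a : List Int) (x : Int) : Bool :=
  let lo := bs_while a x a.length 0 a.length
  decide (lo < a.length) && (a.getD lo 0 == x)

-- the 'for item in items' loop of B with its early return
def have_lists_changed_alt_loop (s1 : List Int) (s2 : List Int) : List Int → Bool
  | [] => false
  | item :: rest =>
      if bs_contains s1 item != bs_contains s2 item then true
      else have_lists_changed_alt_loop s1 s2 rest

def have_lists_changed_alt (list1 : List Int) (list2 : List Int) (items : List Int) : Bool :=
  let s1 := PySem.List.sorted list1 (fun x => x) false
  let s2 := PySem.List.sorted list2 (fun x => x) false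
  have_lists_changed_alt_loop s1 s2 items

-- ===== PRECONDITION & SPEC =====
def Spec_have_lists_changed (list1 : List Int) (list2 : List Int) (items : List Int) (out : Bool) : Prop := out = have_lists_changed_alt list1 list2 items
instance (list1 : List Int) (list2 : List Int) (items : List Int) (out : Bool) : Decidable (Spec_have_lists_changed list1 list2 items out) := by unfold Spec_have_lists_changed; infer_instance

-- ===== CLAIM (what is proved, stated in full; the proofs are below) =====
def Claim_equal_have_lists_changed : Prop := ∀ (list1 : List Int) (list2 : List Int) (items : List Int), Dom_have_lists_changed list1 list2 items → Spec_have_lists_changed list1 list2 items (have_lists_changed list1 list2 items)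

-- ===== LEMMAS AND PROOFS =====

-- binary-search invariant: on a ≤-sorted list, the loop ends at a point r with
-- everything strictly below x to its left and everything ≥ x from r on
lemma bs_while_inv (a : List Int) (x : Int) (hs : a.Pairwise (· ≤ ·)) :
    ∀ (n lo hi : Nat), hi - lo ≤ n → lo ≤ hi → hi ≤ a.length →
    (∀ i, i < lo → i < a.length → a.getD i 0 < x) →
    (∀ i, hi ≤ i → i < a.length → x ≤ a.getD i 0) →
    (bs_while a x n lo hi ≤ a.length) ∧
    (∀ i, i < bs_while a x n lo hi → i < a.length → a.getD i 0 < x) ∧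
    (∀ i, bs_while a x n lo hi ≤ i → i < a.length → x ≤ a.getD i 0) := by
  intro n
  induction n with
  | zero =>
      intro lo hi hn hlh hhl h1 h2
      have : lo = hi := by omega
      subst this
      simp only [bs_while]
      exact ⟨hhl, h1, h2⟩
  | succ n ih =>
      intro lo hi hn hlh hhl h1 h2
      by_cases h : lo < hi
      · simp only [bs_while, h, if_true]
        have hmid1 : lo ≤ (lo + hi) / 2 := by omega
        have hmid2 : (lo + hi) / 2 < hi := by omega
        have hmono : ∀ i j, i ≤ j → j < a.length → a.getD i 0 ≤ a.getD j 0 := by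
          intro i j hij hj
          rcases Nat.eq_or_lt_of_le hij with rfl | hlt
          · exact le_refl _
          · have hi' : i < a.length := lt_trans hlt hj
            rw [List.getD_eq_getElem a 0 hi', List.getD_eq_getElem a 0 hj]
            exact (List.pairwise_iff_getElem.mp hs) i j hi' hj hlt
        by_cases hc : a.getD ((lo + hi) / 2) 0 < x
        · simp only [hc, if_true]
          apply ih ((lo + hi) / 2 + 1) hi (by omega) (by omega) hhl
          · intro i hi' hil
            rcases Nat.lt_or_ge i ((lo + hi) / 2) with hlt | hge
            · exact lt_of_le_of_lt (hmono i ((lo + hi) / 2) (by omega) (by omega)) hc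
            · have : i = (lo + hi) / 2 := by omega
              subst this; exact hc
          · exact h2
        · simp only [hc, if_false]
          apply ih lo ((lo + hi) / 2) (by omega) (by omega) (by omega) h1
          intro i hi' hil
          exact le_trans (le_of_not_gt hc) (hmono ((lo + hi) / 2) i hi' hil)
      · simp only [bs_while, h, if_false]
        have : lo = hi := by omega
        subst this
        exact ⟨by omega, h1, h2⟩

-- on a ≤-sorted list, binary-search membership agrees with List.contains
lemma bs_contains_eq (a : List Int) (x : Int) (hs : a.Pairwise (· ≤ ·)) :
    bs_contains a x = a.contains x := by
  obtain ⟨hle, h1, h2⟩ :=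
    bs_while_inv a x hs a.length 0 a.length (by omega) (by omega) (le_refl _)
      (by intro i h _; omega) (by intro i h hl; omega)
  set r := bs_while a x a.length 0 a.length with hr
  rw [Bool.eq_iff_iff]
  simp only [bs_contains, ← hr, Bool.and_eq_true, decide_eq_true_eq, beq_iff_eq,
    List.contains_eq_mem, List.mem_iff_getElem]
  constructor
  · rintro ⟨hrl, hx⟩
    exact ⟨r, hrl, by rw [← List.getD_eq_getElem a 0 hrl]; exact hx⟩
  · rintro ⟨j, hj, hjx⟩
    have hjx' : a.getD j 0 = x := by rw [List.getD_eq_getElem a 0 hj]; exact hjx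
    have hjr : r ≤ j := by
      by_contra hc
      exact absurd hjx' (ne_of_lt (h1 j (by omega) hj))
    have hrl : r < a.length := lt_of_le_of_lt hjr hj
    refine ⟨hrl, le_antisymm ?_ (h2 r (le_refl _) hrl)⟩
    calc a.getD r 0 ≤ a.getD j 0 := by
          rcases Nat.eq_or_lt_of_le hjr with rfl | hlt
          · exact le_refl _
          · rw [List.getD_eq_getElem a 0 hrl, List.getD_eq_getElem a 0 hj]
            exact (List.pairwise_iff_getElem.mp hs) r j hrl hj hlt
      _ = x := hjx'

-- B's binary search on the sorted copy decides membership in the original list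
lemma bs_contains_sorted (l : List Int) (x : Int) :
    bs_contains (PySem.List.sorted l (fun x => x) false) x = l.contains x := by
  rw [bs_contains_eq _ _ (by simpa using PySem.List.sorted_pairwise l (fun x => x))]
  simp [List.contains_eq_mem, PySem.List.mem_sorted]

-- both per-item loops compute 'some item's membership bits differ'
lemma loopA_eq_any (list1 list2 items : List Int) :
    have_lists_changed_loop list1 list2 items
      = items.any (fun x => list1.contains x != list2.contains x) := by
  induction items with
  | nil => rfl
  | cons x xs ih =>
      simp only [have_lists_changed_loop, List.any_cons, ih]
      cases h1 : list1.contains x <;> cases h2 : list2.contains x <;> simp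
  
lemma loopB_eq_any (s1 s2 items : List Int) :
    have_lists_changed_alt_loop s1 s2 items
      = items.any (fun x => bs_contains s1 x != bs_contains s2 x) := by
  induction items with
  | nil => rfl
  | cons x xs ih =>
      simp only [have_lists_changed_alt_loop, List.any_cons, ih]
      cases h : bs_contains s1 x != bs_contains s2 x <;> simp

-- ===== VERDICT (by name: the statement is the Claim_ definition above) =====
theorem have_lists_changed_spec : Claim_equal_have_lists_changed := by
  intro list1 list2 items _
  unfold Spec_have_lists_changed have_lists_changed_alt
  rw [loopB_eq_any]
  have halt : (items.any (fun x => bs_contains (PySem.List.sorted list1 (fun x => x) false) x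
      != bs_contains (PySem.List.sorted list2 (fun x => x) false) x))
      = items.any (fun x => list1.contains x != list2.contains x) := by
    congr 1
    funext x
    rw [bs_contains_sorted, bs_contains_sorted]
  rw [halt]
  unfold have_lists_changed
  by_cases h : list1 = list2
  · subst h; simp
  · rw [if_neg (by simpa using h), loopA_eq_any]
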